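-- pv_equiv track=rewrite | github.com/AlphaStan/alphacross | src/main/cross_game.py | _check_if_four_aligned_tokens
-- ===== SOURCE A (Python) =====
-- def _check_if_four_aligned_tokens(token_list, agent_id):
--     previous_token = 0
--     consecutive_tokens = 0
--     for token in token_list:
--         if token == agent_id and previous_token == agent_id:
--             consecutive_tokens += 1
--             previous_token = token
--         elif token == agent_id:
--             consecutive_tokens = 1
--             previous_token = token
--         else:
--             consecutive_tokens = 0
--         if consecutive_tokens == 4:
--             return True
--     return False
-- ===== SOURCE B (Python) =====
-- def _check_if_four_aligned_tokens(token_list, agent_id):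
--     target = [agent_id] * 4
--     return any(token_list[i:i + 4] == target for i in range(len(token_list) - 3))
-- ===== Notes on version B (the rewrite author's own statement) =====
-- stated objective: simpler
-- what changed: Replaced the previous-token/consecutive-counter state machine with a stateless sliding-window check: compare each length-4 slice against [agent_id]*4.
import Mathlib
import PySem

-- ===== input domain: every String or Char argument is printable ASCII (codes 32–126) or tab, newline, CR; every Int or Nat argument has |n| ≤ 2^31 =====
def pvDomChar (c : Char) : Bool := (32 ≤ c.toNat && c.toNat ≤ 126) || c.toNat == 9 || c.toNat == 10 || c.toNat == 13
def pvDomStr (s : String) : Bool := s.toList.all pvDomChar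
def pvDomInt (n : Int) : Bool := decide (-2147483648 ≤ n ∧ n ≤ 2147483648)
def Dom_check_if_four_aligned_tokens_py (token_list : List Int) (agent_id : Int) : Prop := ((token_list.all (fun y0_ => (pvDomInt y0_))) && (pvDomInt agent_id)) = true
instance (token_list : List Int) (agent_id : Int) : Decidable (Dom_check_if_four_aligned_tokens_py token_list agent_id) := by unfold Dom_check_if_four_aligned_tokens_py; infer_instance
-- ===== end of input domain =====

-- B replaces A's previous-token/consecutive-counter state machine by a stateless
-- sliding-window check (objective: simpler); same return value on every input.

-- ===== PORT A =====
-- A's for-loop over token_list with state (previous_token, consecutive_tokens) and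
-- early return on consecutive_tokens == 4.
def pvALoop (agent_id : Int) : List Int → Int → Int → Bool
  | [], _, _ => false
  | token :: rest, previous_token, consecutive_tokens =>
    let st :=
      if token == agent_id && previous_token == agent_id then
        (consecutive_tokens + 1, token)
      else if token == agent_id then
        ((1 : Int), token)
      else
        ((0 : Int), previous_token)
    if st.1 == 4 then true else pvALoop agent_id rest st.2 st.1

def check_if_four_aligned_tokens_py (token_list : List Int) (agent_id : Int) : Bool :=
  pvALoop agent_id token_list 0 0

-- ===== PORT B =====
def check_if_four_aligned_tokens_py_alt (token_list : List Int) (agent_id : Int) : Bool :=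
  let target := List.replicate 4 agent_id
  (PySem.List.pyRange 0 ((token_list.length : Int) - 3) 1).any
    (fun i => PySem.List.slice token_list (some i) (some (i + 4)) == target)

-- ===== PRECONDITION & SPEC =====
def Spec_check_if_four_aligned_tokens_py (token_list : List Int) (agent_id : Int) (out : Bool) : Prop := out = check_if_four_aligned_tokens_py_alt token_list agent_id
instance (token_list : List Int) (agent_id : Int) (out : Bool) : Decidable (Spec_check_if_four_aligned_tokens_py token_list agent_id out) := by unfold Spec_check_if_four_aligned_tokens_py; infer_instance

-- ===== CLAIM (what is proved, stated in full; the proofs are below) =====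
def Claim_equal_check_if_four_aligned_tokens_py : Prop := ∀ (token_list : List Int) (agent_id : Int), Dom_check_if_four_aligned_tokens_py token_list agent_id → Spec_check_if_four_aligned_tokens_py token_list agent_id (check_if_four_aligned_tokens_py token_list agent_id)

-- ===== LEMMAS AND PROOFS =====

-- "token_list contains four consecutive tokens equal to agent_id"
def pvW (agent_id : Int) (ts : List Int) : Prop :=
  ∃ i : Nat, (ts.drop i).take 4 = List.replicate 4 agent_id

theorem pvW_nil (agent_id : Int) : ¬ pvW agent_id [] := by
  rintro ⟨i, h⟩
  simp [List.replicate] at h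

theorem pvW_cons (agent_id t : Int) (ts : List Int) :
    pvW agent_id (t :: ts) ↔
      (t :: ts).take 4 = List.replicate 4 agent_id ∨ pvW agent_id ts := by
  constructor
  · rintro ⟨i, h⟩
    cases i with
    | zero => exact Or.inl (by simpa using h)
    | succ j => exact Or.inr ⟨j, by simpa using h⟩
  · rintro (h | ⟨j, h⟩)
    · exact ⟨0, by simpa using h⟩
    · exact ⟨j + 1, by simpa using h⟩

theorem pvTake_mono (agent_id : Int) (ts : List Int) (k m : Nat) (hk : k ≤ m)
    (h : ts.take m = List.replicate m agent_id) :
    ts.take k = List.replicate k agent_id := by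
  have h1 : ts.take k = (ts.take m).take k := by
    rw [List.take_take, Nat.min_eq_left hk]
  rw [h1, h, List.take_replicate, Nat.min_eq_left hk]

-- invariant characterisation of A's loop: with k = 4 - (effective carry),
-- the loop succeeds iff a length-k all-agent prefix completes the run, or a
-- full run of 4 occurs somewhere in ts.
theorem pvALoop_iff (agent_id : Int) :
    ∀ (ts : List Int) (prev c : Int) (k : Nat), 1 ≤ k → k ≤ 4 →
      (if prev = agent_id then c else 0) = 4 - (k : Int) →
      (pvALoop agent_id ts prev c = true ↔
        ts.take k = List.replicate k agent_id ∨ pvW agent_id ts) := by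
  intro ts
  induction ts with
  | nil =>
    intro prev c k hk1 hk4 _
    simp only [pvALoop]
    constructor
    · intro h; cases h
    · rintro (h | h)
      · rw [List.take_nil] at h
        exact absurd (congrArg List.length h) (by simp; omega)
      · exact absurd h (pvW_nil agent_id)
  | cons t ts ih =>
    intro prev c k hk1 hk4 he
    by_cases ht : t = agent_id
    · -- token matches: effective carry becomes (4 - k) + 1
      have hc' : (if t == agent_id && prev == agent_id then (c + 1, t)
          else if t == agent_id then ((1 : Int), t) else ((0 : Int), prev)).1
          = 4 - (k : Int) + 1 := by
        by_cases hp : prev = agent_id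
        · simp [ht, hp]; rw [if_pos hp] at he; omega
        · simp [ht, hp]; rw [if_neg hp] at he; omega
      have hp2 : (if t == agent_id && prev == agent_id then (c + 1, t)
          else if t == agent_id then ((1 : Int), t) else ((0 : Int), prev)).2 = t := by
        by_cases hp : prev = agent_id <;> simp [ht, hp]
      rcases Nat.eq_or_lt_of_le hk1 with h1 | h1
      · -- k = 1: counter reaches 4, A returns True; B's prefix of length 1 holds
        have hk : k = 1 := h1.symm
        subst hk
        simp only [pvALoop, hc', hp2]
        norm_num
        left
        cases ts <;> simp [ht]
      · -- k ≥ 2: recurse with k - 1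
        have hne : ¬ ((4 - (k : Int) + 1) = 4) := by omega
        have step : pvALoop agent_id (t :: ts) prev c = pvALoop agent_id ts t (4 - (k : Int) + 1) := by
          simp only [pvALoop, hc', hp2]
          rw [if_neg (by simpa using hne)]
        rw [step, ih t (4 - (k : Int) + 1) (k - 1) (by omega) (by omega)
          (by rw [if_pos ht]; omega)]
        have hksub : k = (k - 1) + 1 := by omega
        constructor
        · rintro (h | h)
          · left
            rw [hksub, List.take_succ_cons, List.replicate_succ, ht, h]
          · right; rw [pvW_cons]; exact Or.inr h
        · rintro (h | h)
          · left
            rw [hksub, List.take_succ_cons, List.replicate_succ] at h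
            exact (List.cons.injEq _ _ _ _ ▸ h).2
          · rw [pvW_cons] at h
            rcases h with h | h
            · left
              rw [List.take_succ_cons, List.replicate_succ] at h
              have := (List.cons.injEq _ _ _ _ ▸ h).2
              exact pvTake_mono agent_id ts (k - 1) 3 (by omega) this
            · right; exact h
    · -- token mismatch: counter resets to 0, recurse with k = 4
      have step : pvALoop agent_id (t :: ts) prev c = pvALoop agent_id ts prev 0 := by
        simp [pvALoop, ht]
      rw [step, ih prev 0 4 (by omega) (le_refl 4)
        (by by_cases hp : prev = agent_id <;> simp [hp])]
      have hpref : ¬ ((t :: ts).take k = List.replicate k agent_id) := by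
        intro h
        rcases Nat.exists_eq_add_of_le hk1 with ⟨m, hm⟩
        rw [hm, Nat.add_comm, List.take_succ_cons, List.replicate_succ] at h
        exact ht (List.cons.injEq _ _ _ _ ▸ h).1
      rw [pvW_cons]
      have hpref4 : ¬ ((t :: ts).take 4 = List.replicate 4 agent_id) := by
        intro h
        rw [List.take_succ_cons, List.replicate_succ] at h
        exact ht (List.cons.injEq _ _ _ _ ▸ h).1
      tauto

-- B's sliding window is exactly pvW
theorem pvAlt_iff (token_list : List Int) (agent_id : Int) :
    check_if_four_aligned_tokens_py_alt token_list agent_id = true ↔ pvW agent_id token_list := by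
  unfold check_if_four_aligned_tokens_py_alt
  simp only [List.any_eq_true]
  constructor
  · rintro ⟨i, hmem, hp⟩
    rw [PySem.List.mem_pyRange_one] at hmem
    obtain ⟨h0, _⟩ := hmem
    rw [PySem.List.slice_toNat token_list h0 (by omega)] at hp
    refine ⟨i.toNat, ?_⟩
    have h4 : (i + 4).toNat - i.toNat = 4 := by omega
    rw [h4] at hp
    exact beq_iff_eq.mp hp
  · rintro ⟨j, h⟩
    have hlen : 4 ≤ token_list.length - j := by
      have := congrArg List.length h
      simp [List.length_take, List.length_drop] at this
      omega
    refine ⟨(j : Int), ?_, ?_⟩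
    · rw [PySem.List.mem_pyRange_one]
      constructor
      · exact Int.natCast_nonneg j
      · have hj4 : j + 4 ≤ token_list.length := by omega
        omega
    · rw [PySem.List.slice_toNat token_list (Int.natCast_nonneg j) (by positivity)]
      have h4 : ((j : Int) + 4).toNat - (j : Int).toNat = 4 := by omega
      rw [h4, Int.toNat_natCast]
      exact beq_iff_eq.mpr h

-- ===== VERDICT (by name: the statement is the Claim_ definition above) =====
theorem check_if_four_aligned_tokens_py_spec : Claim_equal_check_if_four_aligned_tokens_py := by
  intro token_list agent_id _
  unfold Spec_check_if_four_aligned_tokens_py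
  rw [Bool.eq_iff_iff]
  unfold check_if_four_aligned_tokens_py
  rw [pvALoop_iff agent_id token_list 0 0 4 (by omega) (le_refl 4)
    (by by_cases hp : (0 : Int) = agent_id <;> simp [hp]), pvAlt_iff]
  constructor
  · rintro (h | h)
    · exact ⟨0, by simpa using h⟩
    · exact h
  · intro h; exact Or.inr h
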